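-- pv_equiv track=rewrite | github.com/vikassalaria2412/DataStructureProblemStatements | littlePonyAndMobilePhones.py | mobilephones
-- ===== SOURCE A (Python) =====
-- def mobilephones(A,B):
--     emptyarray = []
--     for i in range(len(B)):
--         count = 0
--         sum = 0
--         for j in range(len(A)):
--             sum = sum + A[j]
--             if (sum <= B[i]):
--                 count += 1
--
--         emptyarray.append(count)
--     return emptyarray
-- ===== SOURCE B (Python) =====
-- def mobilephones(A, B):
--     # Precompute prefix sums once, sort them, then binary-search each query.
--     prefs = []
--     s = 0
--     for x in A:
--         s += x
--         prefs.append(s)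
--     prefs.sort()
--     res = []
--     for b in B:
--         lo, hi = 0, len(prefs)
--         while lo < hi:
--             mid = (lo + hi) // 2
--             if prefs[mid] <= b:
--                 lo = mid + 1
--             else:
--                 hi = mid
--         res.append(lo)
--     return res
-- ===== Notes on version B (the rewrite author's own statement) =====
-- stated objective: faster
-- what changed: B computes the prefix sums once, sorts them, and answers each query with a hand-written binary search instead of re-accumulating the whole prefix-sum loop per query.
import Mathlib
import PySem

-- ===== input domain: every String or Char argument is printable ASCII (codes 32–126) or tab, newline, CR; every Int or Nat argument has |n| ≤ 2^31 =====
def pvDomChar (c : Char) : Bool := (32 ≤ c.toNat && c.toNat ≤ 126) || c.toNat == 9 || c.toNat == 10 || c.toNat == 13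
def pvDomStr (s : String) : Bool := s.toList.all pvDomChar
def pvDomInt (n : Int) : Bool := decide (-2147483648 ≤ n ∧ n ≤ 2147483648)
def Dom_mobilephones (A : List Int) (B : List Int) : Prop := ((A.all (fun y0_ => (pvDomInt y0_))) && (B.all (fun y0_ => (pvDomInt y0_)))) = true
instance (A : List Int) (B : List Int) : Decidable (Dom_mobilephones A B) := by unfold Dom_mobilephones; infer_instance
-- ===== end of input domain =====

-- B precomputes the prefix sums once, sorts them, and binary-searches each query (faster).


-- ===== PORT A =====
-- For each query B[i], re-run the prefix-sum loop over A, counting prefix sums ≤ B[i].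
def mobilephones (A : List Int) (B : List Int) : List Int :=
  (PySem.List.pyRange 0 (PySem.List.len B) 1).foldl (fun emptyarray i =>
    let cs := (PySem.List.pyRange 0 (PySem.List.len A) 1).foldl
      (fun (p : Int × Int) j =>
        let sum := p.2 + PySem.List.pyGetD A j 0
        (if sum ≤ PySem.List.pyGetD B i 0 then p.1 + 1 else p.1, sum))
      (0, 0)
    emptyarray ++ [cs.1]) []

-- ===== PORT B =====
-- the 'while lo < hi' binary-search loop of Source B; lo and hi stay within [0, len prefs],
-- so Nat indices are exact; fuel = hi - lo is a totality guard only (the loop shrinks hi - lo each pass)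
def mobilephonesBsearchGo (prefs : List Int) (b : Int) : Nat → Nat → Nat → Nat
  | 0, lo, _ => lo
  | fuel + 1, lo, hi =>
    if lo < hi then
      let mid := (lo + hi) / 2
      if prefs.getD mid 0 ≤ b then
        mobilephonesBsearchGo prefs b fuel (mid + 1) hi
      else
        mobilephonesBsearchGo prefs b fuel lo mid
    else lo

def mobilephonesBsearch (prefs : List Int) (b : Int) (lo hi : Nat) : Nat :=
  mobilephonesBsearchGo prefs b (hi - lo) lo hi

def mobilephones_alt (A : List Int) (B : List Int) : List Int :=
  let prefs := (A.foldl (fun (p : List Int × Int) x =>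
    let s := p.2 + x
    (p.1 ++ [s], s)) ([], 0)).1
  let sp := PySem.List.sorted prefs (fun x => x) false
  B.foldl (fun res b => res ++ [(mobilephonesBsearch sp b 0 sp.length : Int)]) []

-- ===== PRECONDITION & SPEC =====
def Spec_mobilephones (A : List Int) (B : List Int) (out : List Int) : Prop := out = mobilephones_alt A B
instance (A : List Int) (B : List Int) (out : List Int) : Decidable (Spec_mobilephones A B out) := by unfold Spec_mobilephones; infer_instance

-- ===== CLAIM (what is proved, stated in full; the proofs are below) =====
def Claim_equal_mobilephones : Prop := ∀ (A : List Int) (B : List Int), Dom_mobilephones A B → Spec_mobilephones A B (mobilephones A B)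

-- ===== LEMMAS AND PROOFS =====

-- running prefix sums of A starting from accumulated value s
def prefsFrom (s : Int) : List Int → List Int
  | [] => []
  | x :: xs => (s + x) :: prefsFrom (s + x) xs

-- A's inner loop computes (count of prefix sums ≤ b, total sum)
theorem innerA (b : Int) (A : List Int) : ∀ (c s : Int),
    A.foldl (fun (p : Int × Int) x =>
      (if p.2 + x ≤ b then p.1 + 1 else p.1, p.2 + x)) (c, s)
    = (c + ((prefsFrom s A).countP (fun v => v ≤ b) : Int), s + A.sum) := by
  induction A with
  | nil => intro c s; simp [prefsFrom]
  | cons x xs ih =>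
    intro c s
    simp only [List.foldl_cons, prefsFrom, List.countP_cons, ih]
    by_cases h : s + x ≤ b <;>
      simp [h, Prod.ext_iff] <;>
      first
        | (constructor <;> ring)
        | ring

-- A's inner loop, with the range/index scaffolding, equals the countP of the prefix sums
theorem innerFull (A : List Int) (bv : Int) :
    ((PySem.List.pyRange 0 (PySem.List.len A) 1).foldl
      (fun (p : Int × Int) j =>
        let sum := p.2 + PySem.List.pyGetD A j 0
        (if sum ≤ bv then p.1 + 1 else p.1, sum)) (0, 0)).1
    = ((prefsFrom 0 A).countP (fun v => v ≤ bv) : Int) := by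
  rw [PySem.List.len_eq,
    PySem.List.foldl_pyRange_zero_pyGetD' A 0
      (fun (p : Int × Int) x => (if p.2 + x ≤ bv then p.1 + 1 else p.1, p.2 + x)) (0, 0),
    innerA bv A 0 0]
  simp

-- B's prefix-sum loop builds prefsFrom
theorem prefsB (A : List Int) : ∀ (l : List Int) (s : Int),
    (A.foldl (fun (p : List Int × Int) x => (p.1 ++ [p.2 + x], p.2 + x)) (l, s)).1
    = l ++ prefsFrom s A := by
  induction A with
  | nil => intro l s; simp [prefsFrom]
  | cons x xs ih => intro l s; simp [prefsFrom, ih]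

-- a position lo with everything below it ≤ b and everything at or above it > b is the count
theorem countP_split (sp : List Int) (b : Int) (lo : Nat) (hhl : lo ≤ sp.length)
    (hlow : ∀ i : Nat, (h : i < sp.length) → i < lo → sp[i] ≤ b)
    (hhigh : ∀ i : Nat, (h : i < sp.length) → lo ≤ i → ¬ sp[i] ≤ b) :
    (sp.countP (fun v => v ≤ b) : Nat) = lo := by
  conv_lhs => rw [← List.take_append_drop lo sp]
  rw [List.countP_append]
  have h1 : (sp.take lo).countP (fun v => v ≤ b) = (sp.take lo).length := by
    rw [List.countP_eq_length]
    intro a ha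
    obtain ⟨i, hi', hval⟩ := List.getElem_of_mem ha
    have hwl : i < lo := by have := List.length_take_le lo sp; omega
    rw [List.getElem_take] at hval
    exact decide_eq_true (hval ▸ hlow i (by omega) hwl)
  have h2 : (sp.drop lo).countP (fun v => v ≤ b) = 0 := by
    rw [List.countP_eq_zero]
    intro a ha
    obtain ⟨i, hi', hval⟩ := List.getElem_of_mem ha
    rw [List.getElem_drop] at hval
    have hlen2 : lo + i < sp.length := by
      have h3 : (sp.drop lo).length = sp.length - lo := List.length_drop
      omega
    simp only [decide_eq_true_eq]
    exact hval ▸ hhigh (lo + i) hlen2 (by omega)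
  rw [h1, h2, List.length_take, Nat.min_eq_left hhl]
  omega

-- the binary search counts the elements ≤ b of a ≤-sorted list
theorem bsearch_count (sp : List Int) (b : Int)
    (hmono : ∀ p q : Nat, (hp : p < sp.length) → (hq : q < sp.length) → p ≤ q → sp[p] ≤ sp[q]) :
    ∀ (fuel lo hi : Nat), hi - lo ≤ fuel → lo ≤ hi → hi ≤ sp.length →
    (∀ i : Nat, (h : i < sp.length) → i < lo → sp[i] ≤ b) →
    (∀ i : Nat, (h : i < sp.length) → hi ≤ i → ¬ sp[i] ≤ b) →
    mobilephonesBsearchGo sp b fuel lo hi = sp.countP (fun v => v ≤ b) := by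
  intro fuel
  induction fuel with
  | zero =>
    intro lo hi hfuel hlh hhl hlow hhigh
    have hlo : lo = hi := by omega
    subst hlo
    exact (countP_split sp b lo hhl hlow hhigh).symm
  | succ fuel ih =>
    intro lo hi hfuel hlh hhl hlow hhigh
    rw [mobilephonesBsearchGo]
    by_cases h : lo < hi
    · simp only [h, if_pos]
      have hmid1 : lo ≤ (lo + hi) / 2 := by omega
      have hmid2 : (lo + hi) / 2 < hi := by omega
      have hget : sp.getD ((lo + hi) / 2) 0 = sp[(lo + hi) / 2]'(by omega) := by
        rw [List.getD_eq_getElem?_getD, List.getElem?_eq_getElem (by omega)]; rfl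
      by_cases hle : sp.getD ((lo + hi) / 2) 0 ≤ b
      · simp only [hle, if_pos]
        refine ih ((lo + hi) / 2 + 1) hi (by omega) (by omega) hhl ?_ hhigh
        intro i hi' hilt
        have := hmono i ((lo + hi) / 2) hi' (by omega) (by omega)
        rw [hget] at hle; omega
      · simp only [hle, if_neg, not_false_iff]
        refine ih lo ((lo + hi) / 2) (by omega) (by omega) (by omega) hlow ?_
        intro i hi' hge
        have := hmono ((lo + hi) / 2) i (by omega) hi' hge
        rw [hget] at hle; omega
    · simp only [h, if_neg, not_false_iff]
      have hlo : lo = hi := by omega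
      subst hlo
      exact (countP_split sp b lo hhl hlow hhigh).symm

-- the binary search over the sorted prefix list counts the prefix sums ≤ b
theorem sortedCount (l : List Int) (b : Int) :
    ((mobilephonesBsearch (PySem.List.sorted l (fun x => x) false) b 0
      (PySem.List.sorted l (fun x => x) false).length : Nat) : Int)
    = (l.countP (fun v => v ≤ b) : Int) := by
  have hperm := PySem.List.sorted_perm l (fun x => x) false
  rw [← hperm.countP_eq]
  unfold mobilephonesBsearch
  congr 1
  exact bsearch_count _ b
    (fun p q hp hq hpq => PySem.List.sorted_id_getElem_mono l hpq hq)
    _ 0 _ (by omega) (by omega) le_rfl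
    (fun i h hlt => absurd hlt (by omega))
    (fun i h hge => absurd hge (by omega))

-- ===== VERDICT (by name: the statement is the Claim_ definition above) =====
theorem mobilephones_spec : Claim_equal_mobilephones := by
  intro A B _
  unfold Spec_mobilephones mobilephones mobilephones_alt
  simp only [prefsB A [] 0, List.nil_append]
  rw [PySem.List.len_eq B,
    PySem.List.foldl_pyRange_zero_pyGetD' B 0
      (fun (acc : List Int) (bv : Int) =>
        acc ++ [((PySem.List.pyRange 0 (PySem.List.len A) 1).foldl
          (fun (p : Int × Int) j =>
            let sum := p.2 + PySem.List.pyGetD A j 0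
            (if sum ≤ bv then p.1 + 1 else p.1, sum)) (0, 0)).1]) [],
    PySem.List.foldl_append_singleton_eq_map, PySem.List.foldl_append_singleton_eq_map]
  refine List.map_congr_left ?_
  intro b _
  rw [innerFull A b, ← sortedCount (prefsFrom 0 A) b]
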